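-- pv_equiv track=rewrite | github.com/FCare/alfred | backend/app/services/search_service.py | _generate_highlight
-- ===== SOURCE A (Python) =====
-- from typing import List as ListType, Optional, Dict
--
-- def _generate_highlight(text: str, search_terms: ListType[str], max_length: int = 100) -> Optional[str]:
--     """
--     Generate highlighted text snippet for search results
--     """
--     if not text or not search_terms:
--         return None
--
--     text_lower = text.lower()
--
--     # Find the first match
--     first_match_pos = None
--     first_match_term = None
--
--     for term in search_terms:
--         pos = text_lower.find(term)
--         if pos != -1:
--             if first_match_pos is None or pos < first_match_pos:
--                 first_match_pos = pos
--                 first_match_term = term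
--
--     if first_match_pos is None:
--         # No match found, return truncated text
--         return text[:max_length] + "..." if len(text) > max_length else text
--
--     # Calculate snippet boundaries
--     term_length = len(first_match_term)
--     start = max(0, first_match_pos - (max_length - term_length) // 2)
--     end = min(len(text), start + max_length)
--
--     # Adjust start if end reached text limit
--     if end == len(text):
--         start = max(0, end - max_length)
--
--     snippet = text[start:end]
--
--     # Add ellipsis if truncated
--     if start > 0:
--         snippet = "..." + snippet
--     if end < len(text):
--         snippet = snippet + "..."
--
--     return snippet
-- ===== SOURCE B (Python) =====
-- from typing import List as ListType, Optional
--
-- def _generate_highlight(text: str, search_terms: ListType[str], max_length: int = 100) -> Optional[str]: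
--     if not text or not search_terms:
--         return None
--
--     text_lower = text.lower()
--     n = len(text)
--
--     # Position-major scan: walk the text left to right and stop at the first
--     # position where any term matches (inner loop order = list order, so the
--     # earliest-position / first-term tie-break is by construction).
--     hit = None
--     for i in range(n):
--         for t in search_terms:
--             if text_lower.startswith(t, i):
--                 hit = (i, t)
--                 break
--         if hit is not None:
--             break
--
--     if hit is None:
--         return text[:max_length] + "..." if n > max_length else text
--
--     pos, term = hit
--     start = max(0, min(pos - (max_length - len(term)) // 2, n - max_length))
--     end = min(n, start + max_length)
--     return ("..." if start > 0 else "") + text[start:end] + ("..." if end < n else "")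
-- ===== Notes on version B (the rewrite author's own statement) =====
-- stated objective: faster
-- what changed: A scans term-by-term with str.find plus manual running-min tie-break tracking; B scans the text position-by-position (outer loop over indices, inner startswith over the terms, break on the first hit), so the earliest-position/first-term winner falls out of the traversal order and the scan stops at the first match instead of running every term's find over the whole text; the adjust-after-the-fact snippet boundary is replaced by one closed form start = max(0, min(s0, n - max_length)).
import Mathlib
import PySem

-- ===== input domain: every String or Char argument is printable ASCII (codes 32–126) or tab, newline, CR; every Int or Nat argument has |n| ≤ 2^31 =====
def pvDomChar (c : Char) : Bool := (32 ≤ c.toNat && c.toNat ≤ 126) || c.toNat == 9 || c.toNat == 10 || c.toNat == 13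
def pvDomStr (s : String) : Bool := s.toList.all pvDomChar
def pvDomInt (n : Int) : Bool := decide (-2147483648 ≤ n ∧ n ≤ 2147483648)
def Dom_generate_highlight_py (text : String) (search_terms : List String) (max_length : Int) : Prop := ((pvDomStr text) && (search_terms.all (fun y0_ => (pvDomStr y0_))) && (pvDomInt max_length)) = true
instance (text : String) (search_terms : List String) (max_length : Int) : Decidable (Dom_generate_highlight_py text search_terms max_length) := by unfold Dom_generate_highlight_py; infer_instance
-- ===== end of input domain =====

-- B replaces A's term-major find loop (running-minimum tie-break state) with a position-major
-- scan of the text that stops at the first matching position, and the adjust-after-the-fact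
-- snippet boundaries with one closed form; the scan stops at the first match (measured faster).

-- ===== PORT A =====
def generate_highlight_py (text : String) (search_terms : List String) (max_length : Int) : Option String :=
  if text = "" ∨ search_terms = [] then none
  else
    let text_lower := PySem.Str.lower text
    -- for term in search_terms: pos = text_lower.find(term); keep first strictly-smaller pos
    let fm : Option (Int × String) := search_terms.foldl (fun acc term =>
      let pos := PySem.Str.find text_lower term
      if pos ≠ -1 then
        match acc with
        | none => some (pos, term)
        | some (p, _) => if pos < p then some (pos, term) else acc
      else acc) none
    match fm with
    | none =>
        if PySem.Str.len text > max_length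
        then some (PySem.Str.slice text none (some max_length) ++ "...")
        else some text
    | some (first_match_pos, first_match_term) =>
        let term_length : Int := PySem.Str.len first_match_term
        let start := max 0 (first_match_pos - PySem.Int.floordiv (max_length - term_length) 2)
        let end_ := min (PySem.Str.len text) (start + max_length)
        let start := if end_ = PySem.Str.len text then max 0 (end_ - max_length) else start
        let snippet := PySem.Str.slice text (some start) (some end_)
        let snippet := if start > 0 then "..." ++ snippet else snippet
        let snippet := if end_ < PySem.Str.len text then snippet ++ "..." else snippet
        some snippet

-- ===== PORT B =====
-- the position-major scan: for i in range(...): for t in terms: if text_lower.startswith(t, i): …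
-- text_lower.startswith(t, i) with 0 ≤ i ≤ len is exactly 't.toList is a prefix of the drop at i'
-- (PySem.Chars.startswith on the dropped list); the outer for-with-break is this fuel recursion.
def pvScanB (tl : List Char) (terms : List String) : Nat → Nat → Option (Nat × String)
  | _, 0 => none
  | i, fuel+1 =>
    match terms.find? (fun t => PySem.Chars.startswith (tl.drop i) t.toList) with
    | some t => some (i, t)
    | none => pvScanB tl terms (i+1) fuel

def generate_highlight_py_alt (text : String) (search_terms : List String) (max_length : Int) : Option String :=
  if text = "" ∨ search_terms = [] then none
  else
    let text_lower := PySem.Str.lower text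
    let n : Nat := text.toList.length
    match pvScanB text_lower.toList search_terms 0 n with
    | none =>
        if (n : Int) > max_length
        then some (PySem.Str.slice text none (some max_length) ++ "...")
        else some text
    | some (pos, term) =>
        let start := max 0 (min ((pos : Int) - PySem.Int.floordiv (max_length - PySem.Str.len term) 2) ((n : Int) - max_length))
        let end_ := min (n : Int) (start + max_length)
        let pre := if start > 0 then "..." else ""
        let suf := if end_ < (n : Int) then "..." else ""
        some (pre ++ PySem.Str.slice text (some start) (some end_) ++ suf)

-- ===== PRECONDITION & SPEC =====
def Spec_generate_highlight_py (text : String) (search_terms : List String) (max_length : Int) (out : Option String) : Prop := out = generate_highlight_py_alt text search_terms max_length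
instance (text : String) (search_terms : List String) (max_length : Int) (out : Option String) : Decidable (Spec_generate_highlight_py text search_terms max_length out) := by unfold Spec_generate_highlight_py; infer_instance

-- ===== CLAIM (what is proved, stated in full; the proofs are below) =====
def Claim_equal_generate_highlight_py : Prop := ∀ (text : String) (search_terms : List String) (max_length : Int), Dom_generate_highlight_py text search_terms max_length → Spec_generate_highlight_py text search_terms max_length (generate_highlight_py text search_terms max_length)

-- ===== LEMMAS AND PROOFS =====

-- abbreviation for A's fold step
def pvStepA (tl : List Char) (acc : Option (Int × String)) (term : String) : Option (Int × String) :=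
  let pos := PySem.Chars.find tl term.toList
  if pos ≠ -1 then
    match acc with
    | none => some (pos, term)
    | some (p, _) => if pos < p then some (pos, term) else acc
  else acc

-- a prefix of a drop is an infix
theorem pv_prefix_drop_infix {t tl : List Char} {i : Nat} (h : t <+: tl.drop i) : t <:+: tl :=
  (h.isInfix).trans (tl.drop_suffix i).isInfix

-- no term matches anywhere: A's fold is none
theorem pv_foldA_none (tl : List Char) (terms : List String)
    (h : ∀ t ∈ terms, ¬ t.toList <:+: tl) :
    terms.foldl (pvStepA tl) none = none := by
  induction terms with
  | nil => rfl
  | cons t ts ih =>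
    have hm : PySem.Chars.find tl t.toList = -1 :=
      (PySem.Chars.find_eq_neg_one_iff tl t.toList).mpr (h t (by simp))
    have hstep : pvStepA tl none t = none := by simp [pvStepA, hm]
    rw [List.foldl_cons, hstep]
    exact ih (fun u hu => h u (by simp [hu]))

-- no term matches anywhere: the scan is none
theorem pv_scan_none (tl : List Char) (terms : List String)
    (h : ∀ t ∈ terms, ¬ t.toList <:+: tl) :
    ∀ fuel i, pvScanB tl terms i fuel = none := by
  intro fuel
  induction fuel with
  | zero => intro i; rfl
  | succ f ih =>
    intro i
    have hf : terms.find? (fun t => PySem.Chars.startswith (tl.drop i) t.toList) = none := by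
      rw [List.find?_eq_none]
      intro t ht
      by_contra hb
      have hp : t.toList <+: tl.drop i := (PySem.Chars.startswith_iff _ _).mp (by simpa using hb)
      exact h t ht (pv_prefix_drop_infix hp)
    simp [pvScanB, hf, ih]

-- the scan jumps over non-matching positions and returns the inner find? at the first match
theorem pv_scan_hit (tl : List Char) (terms : List String) (i₀ : Nat)
    (hmin : ∀ j < i₀, ∀ t ∈ terms, ¬ t.toList <+: tl.drop j)
    (hQ : ∃ t ∈ terms, t.toList <+: tl.drop i₀) :
    ∀ fuel i, i ≤ i₀ → i₀ < i + fuel →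
      pvScanB tl terms i fuel =
        (terms.find? (fun t => PySem.Chars.startswith (tl.drop i₀) t.toList)).map (fun t => (i₀, t)) := by
  intro fuel
  induction fuel with
  | zero => intro i _ h2; omega
  | succ f ih =>
    intro i h1 h2
    by_cases hii : i = i₀
    · subst hii
      cases hf : terms.find? (fun t => PySem.Chars.startswith (tl.drop i) t.toList) with
      | none =>
        exfalso
        obtain ⟨t, ht, hp⟩ := hQ
        have := List.find?_eq_none.mp hf t ht
        rw [PySem.Chars.startswith_iff] at this
        exact this hp
      | some t => simp [pvScanB, hf]
    · have hlt : i < i₀ := lt_of_le_of_ne h1 hii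
      have hf : terms.find? (fun t => PySem.Chars.startswith (tl.drop i) t.toList) = none := by
        rw [List.find?_eq_none]
        intro t ht
        by_contra hb
        exact hmin i hlt t ht ((PySem.Chars.startswith_iff _ _).mp (by simpa using hb))
      simp only [pvScanB, hf]
      exact ih (i+1) (by omega) (by omega)

-- fold invariant: every kept candidate has key > i₀ while scanning the prefix before t₀
theorem pv_foldA_inv (tl : List Char) (p : Int) (hp0 : 0 ≤ p) (l : List String)
    (hl : ∀ u ∈ l, PySem.Chars.find tl u.toList = -1 ∨ p < PySem.Chars.find tl u.toList)
    (acc : Option (Int × String))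
    (hacc : acc = none ∨ ∃ q u, acc = some (q, u) ∧ p < q) :
    l.foldl (pvStepA tl) acc = none ∨ ∃ q u, l.foldl (pvStepA tl) acc = some (q, u) ∧ p < q := by
  induction l generalizing acc with
  | nil => exact hacc
  | cons t ts ih =>
    refine ih (fun u hu => hl u (by simp [hu])) _ ?_
    rcases hl t (by simp) with hm | hm
    · have hstep : ∀ a, pvStepA tl a t = a := by intro a; simp [pvStepA, hm]
      rcases hacc with rfl | ⟨q, u, he, hq⟩
      · rw [hstep]; exact Or.inl rfl
      · rw [hstep]; exact Or.inr ⟨q, u, he, hq⟩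
    · have hne : PySem.Chars.find tl t.toList ≠ -1 := by omega
      rcases hacc with rfl | ⟨q, u, rfl, hq⟩
      · simp only [pvStepA, if_pos hne]
        exact Or.inr ⟨_, _, rfl, hm⟩
      · simp only [pvStepA, if_pos hne]
        by_cases hc : PySem.Chars.find tl t.toList < q
        · simp only [if_pos hc]
          exact Or.inr ⟨_, _, rfl, hm⟩
        · simp only [if_neg hc]
          exact Or.inr ⟨_, _, rfl, hq⟩

-- fold keeps an already-minimal candidate
theorem pv_foldA_keep (tl : List Char) (p : Int) (t : String) (l : List String)
    (hl : ∀ u ∈ l, PySem.Chars.find tl u.toList = -1 ∨ ¬ PySem.Chars.find tl u.toList < p) :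
    l.foldl (pvStepA tl) (some (p, t)) = some (p, t) := by
  induction l with
  | nil => rfl
  | cons u us ih =>
    rcases hl u (by simp) with hm | hm
    · have hstep : pvStepA tl (some (p, t)) u = some (p, t) := by simp [pvStepA, hm]
      rw [List.foldl_cons, hstep]
      exact ih (fun v hv => hl v (by simp [hv]))
    · by_cases hne : PySem.Chars.find tl u.toList = -1
      · have hstep : pvStepA tl (some (p, t)) u = some (p, t) := by simp [pvStepA, hne]
        rw [List.foldl_cons, hstep]
        exact ih (fun v hv => hl v (by simp [hv]))
      · have hstep : pvStepA tl (some (p, t)) u = some (p, t) := by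
          simp only [pvStepA, if_pos hne, if_neg hm]
        rw [List.foldl_cons, hstep]
        exact ih (fun v hv => hl v (by simp [hv]))

-- main agreement of the two searches
theorem pv_search_eq (tl : List Char) (terms : List String) (n : Nat)
    (hn : tl.length = n) (hn0 : 0 < n) :
    terms.foldl (pvStepA tl) none =
      (pvScanB tl terms 0 n).map (fun c => ((c.1 : Int), c.2)) := by
  by_cases hex : ∃ t ∈ terms, t.toList <:+: tl
  · -- some term matches somewhere: let i₀ be the least matching position
    have hQex : ∃ i, ∃ t ∈ terms, t.toList <+: tl.drop i := by
      obtain ⟨t, ht, hinf⟩ := hex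
      have hfind : PySem.Chars.find tl t.toList ≠ -1 :=
        (PySem.Chars.find_ne_neg_one_iff tl t.toList).mpr hinf
      have h0 : 0 ≤ PySem.Chars.find tl t.toList := by
        have := PySem.Chars.neg_one_le_find tl t.toList; omega
      exact ⟨(PySem.Chars.find tl t.toList).toNat, t, ht, (PySem.Chars.find_spec h0).1⟩
    classical
    let i₀ := Nat.find hQex
    have hQ : ∃ t ∈ terms, t.toList <+: tl.drop i₀ := Nat.find_spec hQex
    have hmin : ∀ j < i₀, ∀ t ∈ terms, ¬ t.toList <+: tl.drop j := by
      intro j hj t ht hp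
      exact Nat.find_min hQex hj ⟨t, ht, hp⟩
    -- every matching term's find is ≥ i₀, and = i₀ iff it matches at i₀
    have hgey : ∀ t ∈ terms, PySem.Chars.find tl t.toList ≠ -1 →
        (i₀ : Int) ≤ PySem.Chars.find tl t.toList := by
      intro t ht hne
      have h0 : 0 ≤ PySem.Chars.find tl t.toList := by
        have := PySem.Chars.neg_one_le_find tl t.toList; omega
      by_contra hlt
      push_neg at hlt
      have hj : (PySem.Chars.find tl t.toList).toNat < i₀ := by omega
      exact hmin _ hj t ht (PySem.Chars.find_spec h0).1
    have hkey : ∀ t ∈ terms, (t.toList <+: tl.drop i₀ ↔ PySem.Chars.find tl t.toList = (i₀ : Int)) := by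
      intro t ht
      constructor
      · intro hp
        have hinf : t.toList <:+: tl := pv_prefix_drop_infix hp
        have hne : PySem.Chars.find tl t.toList ≠ -1 :=
          (PySem.Chars.find_ne_neg_one_iff tl t.toList).mpr hinf
        have h0 : 0 ≤ PySem.Chars.find tl t.toList := by
          have := PySem.Chars.neg_one_le_find tl t.toList; omega
        have hle : ¬ (i₀ : Nat) < (PySem.Chars.find tl t.toList).toNat := by
          intro hl
          exact (PySem.Chars.find_spec h0).2 i₀ hl hp
        have := hgey t ht hne
        omega
      · intro he
        have h0 : 0 ≤ PySem.Chars.find tl t.toList := by rw [he]; omega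
        have := (PySem.Chars.find_spec h0).1
        rwa [he] at this
      -- i₀ < n: an empty term matches at 0; a nonempty one needs room
    have hi0 : i₀ < n := by
      obtain ⟨t, ht, hp⟩ := hQ
      by_cases he : t.toList = []
      · -- t = "": it matches at 0, so i₀ = 0 < n
        have : i₀ ≤ 0 := by
          by_contra h
          exact hmin 0 (by omega) t ht (by simp [he])
        omega
      · have h1 : 0 < t.toList.length := List.length_pos_iff.mpr he
        have h2 : t.toList.length ≤ (tl.drop i₀).length := hp.length_le
        rw [List.length_drop] at h2
        omega
    -- B's side: the scan lands on i₀ with the inner find?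
    have hscan := pv_scan_hit tl terms i₀ hmin hQ n 0 (by omega) (by omega)
    -- the inner find? is some
    cases hf : terms.find? (fun t => PySem.Chars.startswith (tl.drop i₀) t.toList) with
    | none =>
      exfalso
      obtain ⟨t, ht, hp⟩ := hQ
      exact (List.find?_eq_none.mp hf t ht) ((PySem.Chars.startswith_iff _ _).mpr hp)
    | some t₀ =>
      -- decompose terms at the first match
      obtain ⟨hpt₀, pre, post, hsplit, hpre⟩ := List.find?_eq_some_iff_append.mp hf
      have ht₀p : t₀.toList <+: tl.drop i₀ := (PySem.Chars.startswith_iff _ _).mp hpt₀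
      have ht₀mem : t₀ ∈ terms := by rw [hsplit]; simp
      have hkt₀ : PySem.Chars.find tl t₀.toList = (i₀ : Int) := (hkey t₀ ht₀mem).mp ht₀p
      -- A's side
      have hA : terms.foldl (pvStepA tl) none = some ((i₀ : Int), t₀) := by
        rw [hsplit, List.foldl_append, List.foldl_cons]
        have hpre' : ∀ u ∈ pre, PySem.Chars.find tl u.toList = -1 ∨ (i₀ : Int) < PySem.Chars.find tl u.toList := by
          intro u hu
          by_cases hne : PySem.Chars.find tl u.toList = -1
          · exact Or.inl hne
          · refine Or.inr ?_
            have humem : u ∈ terms := by rw [hsplit]; simp [hu]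
            have hge := hgey u humem hne
            have hnp : ¬ u.toList <+: tl.drop i₀ := by
              intro hpp
              exact absurd ((PySem.Chars.startswith_iff _ _).mpr hpp) (by simpa using hpre u hu)
            have : PySem.Chars.find tl u.toList ≠ (i₀ : Int) := fun he => hnp ((hkey u humem).mpr he)
            omega
        have hinv := pv_foldA_inv tl (i₀ : Int) (by omega) pre hpre' none (Or.inl rfl)
        have hstep : pvStepA tl (pre.foldl (pvStepA tl) none) t₀ = some ((i₀ : Int), t₀) := by
          rcases hinv with he | ⟨q, u, he, hq⟩
          · simp only [he, pvStepA, hkt₀]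
            have : ((i₀ : Int)) ≠ -1 := by omega
            simp [this]
          · simp only [he, pvStepA, hkt₀]
            have h1 : ((i₀ : Int)) ≠ -1 := by omega
            simp [h1, hq]
        rw [hstep]
        refine pv_foldA_keep tl (i₀ : Int) t₀ post ?_
        intro u hu
        by_cases hne : PySem.Chars.find tl u.toList = -1
        · exact Or.inl hne
        · have humem : u ∈ terms := by rw [hsplit]; simp [hu]
          have := hgey u humem hne
          exact Or.inr (by omega)
      rw [hA, hscan, hf]
      rfl
  · -- no term matches: both none
    push_neg at hex
    rw [pv_foldA_none tl terms hex, pv_scan_none tl terms hex n 0]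
    rfl

-- A's boundaries (with the end==len adjustment) equal B's closed form.
theorem pv_bounds (s0 n m : Int) :
    ((if min n (max 0 s0 + m) = n then max 0 (min n (max 0 s0 + m) - m) else max 0 s0),
      min n (max 0 s0 + m))
    = (max 0 (min s0 (n - m)), min n (max 0 (min s0 (n - m)) + m)) := by
  simp only [Prod.mk.injEq, max_def, min_def]; split_ifs <;> omega

-- length of lowered text
theorem pv_lower_len (s : String) : (PySem.Str.lower s).toList.length = s.toList.length := by
  simp [PySem.Str.toList_lower, PySem.Chars.lower]

-- ===== VERDICT (by name: the statement is the Claim_ definition above) =====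
theorem generate_highlight_py_spec : Claim_equal_generate_highlight_py := by
  intro text search_terms max_length _
  unfold Spec_generate_highlight_py generate_highlight_py generate_highlight_py_alt
  by_cases hg : text = "" ∨ search_terms = []
  · simp [hg]
  · simp only [hg, if_false]
    push_neg at hg
    have hn0 : 0 < text.toList.length :=
      List.length_pos_iff.mpr (fun hl => hg.1 (String.toList_eq_nil_iff.mp hl))
    have hfold : (fun (acc : Option (Int × String)) (term : String) =>
        let pos := PySem.Str.find (PySem.Str.lower text) term
        if pos ≠ -1 then
          match acc with
          | none => some (pos, term)
          | some (p, _) => if pos < p then some (pos, term) else acc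
        else acc) = pvStepA (PySem.Str.lower text).toList := by
      funext acc term
      simp only [pvStepA, PySem.Str.find_eq]
    rw [hfold, pv_search_eq (PySem.Str.lower text).toList search_terms text.toList.length
      (pv_lower_len text) hn0]
    cases hscan : pvScanB (PySem.Str.lower text).toList search_terms 0 text.toList.length with
    | none =>
      simp [PySem.Str.len_eq]
    | some c =>
      obtain ⟨pos, term⟩ := c
      simp only [Option.map_some, PySem.Str.len_eq]
      have hb := pv_bounds ((pos : Int) - PySem.Int.floordiv (max_length - (term.toList.length : Int)) 2)
        ((text.toList.length : Nat) : Int) max_length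
      rw [Prod.mk.injEq] at hb
      rw [hb.1, hb.2]
      split_ifs <;> simp
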